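-- pv_equiv track=rewrite | github.com/ChangxingJiang/OJ-Practice | Question/0265/0265_Python_1.py | minCostII
-- ===== SOURCE A (Python) =====
-- from typing import List
--
-- def minCostII(costs: List[List[int]]) -> int:
--     if not costs or not costs[0]:
--         return 0
--
--     s1, s2 = len(costs), len(costs[0])  # s1=房子数量，s2=颜色数量
--
--     dp = [[0] * s2 for _ in range(s1)]
--     for i2 in range(s2):
--         dp[0][i2] = costs[0][i2]
--
--     for i1 in range(1, s1):
--         for i2 in range(s2):
--             dp[i1][i2] = costs[i1][i2] + min(dp[i1 - 1][ii2] for ii2 in range(s2) if ii2 != i2)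
--
--     return min(dp[-1])
-- ===== SOURCE B (Python) =====
-- from typing import List
--
-- def minCostII(costs: List[List[int]]) -> int:
--     if not costs or not costs[0]:
--         return 0
--     k = len(costs[0])
--     prev = list(costs[0])
--     for row in costs[1:]:
--         m1 = m2 = None
--         i1 = -1
--         for i, x in enumerate(prev):
--             if m1 is None or x < m1:
--                 m2 = m1
--                 m1 = x
--                 i1 = i
--             elif m2 is None or x < m2:
--                 m2 = x
--         prev = [c + (m2 if j == i1 else m1) for j, c in enumerate(row[:k])]
--     return min(prev)
-- ===== Notes on version B (the rewrite author's own statement) =====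
-- stated objective: faster
-- what changed: Replaces the O(k) min-excluding-one rescan per cell and the full dp table with a single pass per row that records the smallest value, its index and the second smallest value of the previous row, keeping only one rolling row.
import Mathlib
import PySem

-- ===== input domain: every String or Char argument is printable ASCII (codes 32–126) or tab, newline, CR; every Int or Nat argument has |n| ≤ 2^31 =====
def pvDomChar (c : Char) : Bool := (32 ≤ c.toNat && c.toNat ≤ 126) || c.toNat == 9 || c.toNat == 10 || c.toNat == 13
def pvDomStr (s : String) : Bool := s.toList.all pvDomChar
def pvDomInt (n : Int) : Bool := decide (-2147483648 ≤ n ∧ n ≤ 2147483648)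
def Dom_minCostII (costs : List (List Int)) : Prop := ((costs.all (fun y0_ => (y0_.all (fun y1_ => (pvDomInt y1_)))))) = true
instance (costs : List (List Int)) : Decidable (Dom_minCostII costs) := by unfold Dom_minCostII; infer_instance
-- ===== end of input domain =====

-- B replaces A's per-cell min-excluding-one rescan and full dp table by a single pass per
-- row tracking the previous row's smallest value, its index and second smallest value
-- (objective: faster).

-- ===== PORT A =====
-- A's inner generator expression  min(dp[i1-1][ii2] for ii2 in range(s2) if ii2 != i2)
def pvMinExcl (prev : List Int) (s2 i2 : Int) : Int :=
  (PySem.List.min? ((PySem.List.pyRange 0 s2 1).filterMap (fun ii2 =>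
    if ii2 ≠ i2 then some (PySem.List.pyGetD prev ii2 0) else none)) (fun x => x)).getD 0

def minCostII (costs : List (List Int)) : Int :=
  if costs = [] ∨ PySem.List.pyGetD costs 0 [] = [] then 0
  else
    let s1 : Int := (costs.length : Int)
    let s2 : Int := ((PySem.List.pyGetD costs 0 []).length : Int)
    let dp0 : List (List Int) :=
      (PySem.List.pyRange 0 s1 1).map (fun _ => (PySem.List.pyRange 0 s2 1).map (fun _ => (0 : Int)))
    let dp1 : List (List Int) := (PySem.List.pyRange 0 s2 1).foldl (fun dp i2 =>
        PySem.List.pySetD dp 0 (PySem.List.pySetD (PySem.List.pyGetD dp 0 []) i2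
          (PySem.List.pyGetD (PySem.List.pyGetD costs 0 []) i2 0))) dp0
    let dp2 : List (List Int) := (PySem.List.pyRange 1 s1 1).foldl (fun dp i1 =>
        (PySem.List.pyRange 0 s2 1).foldl (fun dp i2 =>
          PySem.List.pySetD dp i1 (PySem.List.pySetD (PySem.List.pyGetD dp i1 []) i2
            (PySem.List.pyGetD (PySem.List.pyGetD costs i1 []) i2 0 +
              pvMinExcl (PySem.List.pyGetD dp (i1 - 1) []) s2 i2))) dp) dp1
    (PySem.List.min? (PySem.List.pyGetD dp2 (-1) []) (fun x => x)).getD 0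

-- ===== PORT B =====
-- B's inner scan body: update (m1, m2, i1) with the enumerated element p = (i, x)
def pvScanStep (st : Option Int × Option Int × Int) (p : Int × Int) :
    Option Int × Option Int × Int :=
  match st.1 with
  | none => (some p.2, st.1, p.1)
  | some v1 =>
    if p.2 < v1 then (some p.2, st.1, p.1)
    else match st.2.1 with
      | none => (st.1, some p.2, st.2.2)
      | some v2 => if p.2 < v2 then (st.1, some p.2, st.2.2) else st

def minCostII_alt (costs : List (List Int)) : Int :=
  match costs with
  | [] => 0
  | r0 :: rest =>
    if r0 = [] then 0
    else
      let k : Int := (r0.length : Int)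
      let prev := rest.foldl (fun prev row =>
        let st := (PySem.List.enumerate prev 0).foldl pvScanStep (none, none, -1)
        (PySem.List.enumerate (PySem.List.slice row none (some k)) 0).map
          (fun q => q.2 + (if q.1 = st.2.2 then st.2.1.getD 0 else st.1.getD 0))) r0
      (PySem.List.min? prev (fun x => x)).getD 0

-- ===== PRECONDITION & SPEC =====
-- Pre_ excludes exactly the inputs on which A raises: a row after the first shorter than
-- row 0 (IndexError), and a single colour with two or more houses (ValueError: min of an
-- empty generator).  On every other input A returns normally.
def Pre_minCostII (costs : List (List Int)) : Prop :=
  costs = [] ∨ costs.head? = some [] ∨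
    ((∀ r ∈ costs, (costs.headD []).length ≤ r.length) ∧
      (costs.length = 1 ∨ 2 ≤ (costs.headD []).length))
instance (costs : List (List Int)) : Decidable (Pre_minCostII costs) := by
  unfold Pre_minCostII; infer_instance

def pvWitness_minCostII : List (List Int) := [[1, 2], [3, 4]]

def Spec_minCostII (costs : List (List Int)) (out : Int) : Prop := out = minCostII_alt costs
instance (costs : List (List Int)) (out : Int) : Decidable (Spec_minCostII costs out) := by
  unfold Spec_minCostII; infer_instance

-- ===== CLAIM (what is proved, stated in full; the proofs are below) =====
def Claim_equal_minCostII : Prop :=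
  ∀ (costs : List (List Int)), Dom_minCostII costs → Pre_minCostII costs →
    Spec_minCostII costs (minCostII costs)

-- ===== LEMMAS AND PROOFS =====

theorem getd_range_self (l : List Int) :
    (List.range l.length).map (fun j => l.getD j 0) = l := by
  apply List.ext_getElem
  · simp
  · intro i h1 h2; simp [List.getD_eq_getElem?_getD, List.getElem?_eq_getElem h2]

theorem filterMap_range_eraseIdx (prev : List Int) : ∀ (j : Nat),
    (List.range prev.length).filterMap
      (fun n => if n ≠ j then some (prev.getD n 0) else none) = prev.eraseIdx j := by
  induction prev with
  | nil => simp
  | cons x xs ih =>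
    intro j
    rw [List.length_cons, List.range_succ_eq_map, List.filterMap_cons,
      List.filterMap_map]
    cases j with
    | zero =>
      simp only [ne_eq, not_true_eq_false, if_false, List.eraseIdx_zero, List.tail_cons]
      have : (fun n => (fun n => if n ≠ 0 then some ((x :: xs).getD n 0) else none) (n+1))
          = (fun n => some (xs.getD n 0)) := by funext n; simp
      rw [show ((fun n => if n ≠ 0 then some ((x :: xs).getD n 0) else none) ∘ (· + 1))
          = (fun n : Nat => some (xs.getD n 0)) from by funext n; simp [Function.comp]]
      rw [show (fun x => (fun n : Nat => some (xs.getD n 0)) x) = some ∘ (fun n : Nat => xs.getD n 0) from rfl,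
        List.filterMap_eq_map]
      exact getd_range_self xs
    | succ j' =>
      have h0 : ((0:Nat) ≠ j' + 1) = True := by simp
      simp only [ne_eq, h0]
      rw [if_pos (by simp)]
      rw [show ((fun n => if n ≠ j' + 1 then some ((x :: xs).getD n 0) else none) ∘ (· + 1))
          = (fun n : Nat => if n ≠ j' then some (xs.getD n 0) else none) from by
        funext n; by_cases h : n = j' <;> simp [h, Function.comp]]
      rw [ih j']
      simp [List.getD]

theorem pymin_eq_min? (l : List Int) : PySem.List.min? l (fun x => x) = l.min? := by
  cases l with
  | nil => simp [PySem.List.min?]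
  | cons x t => rw [PySem.List.min?_id_cons]; simp [List.min?]


theorem pvMinExcl_eq (prev : List Int) (j : Nat) :
    pvMinExcl prev (prev.length : Int) (j : Int) = ((prev.eraseIdx j).min?).getD 0 := by
  unfold pvMinExcl
  rw [pymin_eq_min?]
  congr 2
  rw [PySem.List.pyRange_zero, List.filterMap_map, Int.toNat_natCast]
  rw [show ((fun ii2 => if ii2 ≠ (j:Int) then some (PySem.List.pyGetD prev ii2 0) else none) ∘ (fun k : Nat => (k : Int)))
      = (fun n : Nat => if n ≠ j then some (prev.getD n 0) else none) from by
    funext n; by_cases h : n = j <;> simp [h, Function.comp]]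
  exact filterMap_range_eraseIdx prev j

theorem minExcl_val (xs : List Int) (i j : Nat) (hi : i < xs.length) (hj : j < xs.length)
    (hmin : ∀ (p : Nat) (hp : p < xs.length), xs[i] ≤ xs[p]) (hne : j ≠ i) :
    (xs.eraseIdx j).min? = some xs[i] := by
  rw [List.min?_eq_some_iff]
  constructor
  · -- membership
    have hlen : (xs.eraseIdx j).length = xs.length - 1 := List.length_eraseIdx_of_lt hj
    by_cases h : i < j
    · have hilt : i < (xs.eraseIdx j).length := by omega
      have := List.getElem_eraseIdx (l := xs) (i := j) (j := i) hilt
      rw [dif_pos h] at this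
      exact this ▸ List.getElem_mem hilt
    · have h1 : i - 1 < (xs.eraseIdx j).length := by omega
      have := List.getElem_eraseIdx (l := xs) (i := j) (j := i - 1) h1
      rw [dif_neg (by omega)] at this
      have hv : (xs.eraseIdx j)[i - 1] = xs[i] := by
        rw [this]; congr 1; omega
      exact hv ▸ List.getElem_mem h1
  · intro b hb
    have hbx : b ∈ xs := (List.eraseIdx_sublist xs j).mem hb
    obtain ⟨p, hp, rfl⟩ := List.mem_iff_getElem.mp hbx
    exact hmin p hp

theorem min?_concat (l : List Int) (y : Int) :
    (l ++ [y]).min? = some (min (l.min?.getD y) y) := by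
  cases l with
  | nil => simp [List.min?]
  | cons x t =>
    simp only [List.cons_append, List.min?_cons', Option.getD_some]
    rw [List.foldl_append]
    simp [min_comm]


def pvInv (xs : List Int) (st : Option Int × Option Int × Int) : Prop :=
  ∃ (i : Nat) (hi : i < xs.length),
    st = (some xs[i], (xs.eraseIdx i).min?, (i : Int)) ∧
    ∀ (p : Nat) (hp : p < xs.length), xs[i] ≤ xs[p] ∧ (p < i → xs[i] < xs[p])

theorem scan_step (xs : List Int) (y : Int) (st : Option Int × Option Int × Int)
    (h : pvInv xs st) : pvInv (xs ++ [y]) (pvScanStep st ((xs.length : Int), y)) := by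
  obtain ⟨i, hi, rfl, hprop⟩ := h
  have hxsmin : xs.min? = some xs[i] := by
    rw [List.min?_eq_some_iff]
    refine ⟨List.getElem_mem hi, ?_⟩
    intro b hb
    obtain ⟨p, hp, rfl⟩ := List.mem_iff_getElem.mp hb
    exact (hprop p hp).1
  have hgi : (xs ++ [y])[i]'(by simp; omega) = xs[i] := by
    rw [List.getElem_append_left hi]
  by_cases hy : y < xs[i]
  · -- new minimum at the end
    have : pvScanStep (some xs[i], (xs.eraseIdx i).min?, (i : Int)) ((xs.length : Int), y)
        = (some y, some xs[i], (xs.length : Int)) := by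
      simp [pvScanStep, hy]
    rw [this]
    refine ⟨xs.length, by simp, ?_, ?_⟩
    · rw [List.getElem_concat_length rfl]
      rw [List.eraseIdx_append_of_length_le (le_refl _)]
      simp [hxsmin]
    · intro p hp
      rw [List.getElem_concat_length rfl]
      by_cases hplt : p < xs.length
      · rw [List.getElem_append_left hplt]
        exact ⟨le_of_lt (lt_of_lt_of_le hy (hprop p hplt).1),
          fun _ => lt_of_lt_of_le hy (hprop p hplt).1⟩
      · have : p = xs.length := by simp at hp; omega
        subst this
        rw [List.getElem_concat_length rfl]
        exact ⟨le_refl _, by omega⟩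
  · -- old minimum stays
    have hle : xs[i] ≤ y := le_of_not_gt hy
    have hprop' : ∀ (p : Nat) (hp : p < (xs ++ [y]).length),
        (xs ++ [y])[i]'(by simp; omega) ≤ (xs ++ [y])[p] ∧
          (p < i → (xs ++ [y])[i]'(by simp; omega) < (xs ++ [y])[p]) := by
      intro p hp
      rw [hgi]
      by_cases hplt : p < xs.length
      · rw [List.getElem_append_left hplt]; exact hprop p hplt
      · have : p = xs.length := by simp at hp; omega
        subst this
        rw [List.getElem_concat_length rfl]
        exact ⟨hle, by omega⟩
    have heri : (xs ++ [y]).eraseIdx i = xs.eraseIdx i ++ [y] :=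
      List.eraseIdx_append_of_lt_length hi _
    cases h2 : (xs.eraseIdx i).min? with
    | none =>
      -- xs is a singleton
      have hnil : xs.eraseIdx i = [] := List.min?_eq_none_iff.mp h2
      have hstep : pvScanStep (some xs[i], none, (i : Int)) ((xs.length : Int), y)
          = (some xs[i], some y, (i : Int)) := by
        simp [pvScanStep, hy]
      rw [hstep]
      refine ⟨i, by simp; omega, ?_, hprop'⟩
      rw [hgi, heri, hnil]
      simp [List.min?]
    | some v2 =>
      have hmin2 : (xs.eraseIdx i ++ [y]).min? = some (min v2 y) := by
        rw [min?_concat, h2]; rfl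
      by_cases hy2 : y < v2
      · have hstep : pvScanStep (some xs[i], some v2, (i : Int)) ((xs.length : Int), y)
            = (some xs[i], some y, (i : Int)) := by
          simp [pvScanStep, hy, hy2]
        rw [hstep]
        refine ⟨i, by simp; omega, ?_, hprop'⟩
        rw [hgi, heri, hmin2, min_eq_right (le_of_lt hy2)]
      · have hstep : pvScanStep (some xs[i], some v2, (i : Int)) ((xs.length : Int), y)
            = (some xs[i], some v2, (i : Int)) := by
          simp [pvScanStep, hy, hy2]
        rw [hstep]
        refine ⟨i, by simp; omega, ?_, hprop'⟩
        rw [hgi, heri, hmin2, min_eq_left (le_of_not_gt hy2)]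

theorem scan_inv (xs : List Int) (h : xs ≠ []) :
    pvInv xs ((PySem.List.enumerate xs 0).foldl pvScanStep (none, none, -1)) := by
  induction xs using List.reverseRecOn with
  | nil => exact absurd rfl h
  | append_singleton ys y ih =>
    rw [PySem.List.enumerate_append, List.foldl_append,
      PySem.List.enumerate_cons, PySem.List.enumerate_nil]
    simp only [List.foldl_cons, List.foldl_nil, zero_add]
    cases hys : ys with
    | nil =>
      subst hys
      refine ⟨0, by simp, ?_, ?_⟩
      · simp [PySem.List.enumerate_nil, pvScanStep, List.min?]
      · intro p hp
        simp at hp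
        subst hp
        simp
    | cons a t =>
      have hne : ys ≠ [] := by rw [hys]; simp
      rw [← hys]
      exact scan_step ys y _ (ih hne)

def pvRowStep (k : Nat) (prev row : List Int) : List Int :=
  (PySem.List.pyRange 0 (k : Int) 1).map
    (fun j => PySem.List.pyGetD row j 0 + pvMinExcl prev (k : Int) j)

theorem bRow_eq (prev row : List Int) (k : Nat) (hprev : prev.length = k)
    (hrow : k ≤ row.length) (hk : 2 ≤ k) :
    ((PySem.List.enumerate (PySem.List.slice row none (some (k : Int))) 0).map
       (fun q => q.2 + (if q.1 = ((PySem.List.enumerate prev 0).foldl pvScanStep (none, none, -1)).2.2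
         then ((PySem.List.enumerate prev 0).foldl pvScanStep (none, none, -1)).2.1.getD 0
         else ((PySem.List.enumerate prev 0).foldl pvScanStep (none, none, -1)).1.getD 0)))
    = pvRowStep k prev row := by
  subst hprev
  have hprevne : prev ≠ [] := by intro hcon; rw [hcon] at hk; simp at hk
  obtain ⟨i, hi, hst, hprop⟩ := scan_inv prev hprevne
  rw [hst]
  rw [PySem.List.slice_to_natCast]
  apply List.ext_getElem
  · simp [pvRowStep, hrow, PySem.List.length_pyRange_one]
  · intro j h1 h2
    have hj : j < prev.length := by simpa [hrow] using h1
    simp only [pvRowStep, List.getElem_map]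
    rw [PySem.List.getElem_pyRange_one]
    rw [PySem.List.getElem_enumerate]
    have htke : (row.take prev.length)[j]'(by simp; omega) = row[j]'(by omega) :=
      List.getElem_take
    have hgd : PySem.List.pyGetD row ((0 : Int) + (j : Int)) 0 = row[j]'(by omega) := by
      rw [zero_add, PySem.List.pyGetD_natCast, List.getD_eq_getElem?_getD,
        List.getElem?_eq_getElem (by omega)]
      rfl
    rw [htke, hgd]
    rw [show ((0 : Int) + (j : Int)) = ((j : Nat) : Int) from by ring]
    rw [pvMinExcl_eq prev j]
    congr 1
    by_cases hji : j = i
    · subst hji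
      simp
    · have hcast : ¬(((j : Nat) : Int) = ((i : Nat) : Int)) := by exact_mod_cast hji
      rw [minExcl_val prev i j hi (by omega) (fun p hp => (hprop p hp).1) hji]
      simp [hcast]

theorem loop_set_row (i1 : Nat) (V : List (List Int) → Int → Int)
    (hV : ∀ (d : List (List Int)) (r : List Int) (i2 : Int), V (d.set i1 r) i2 = V d i2) :
    ∀ (m : Nat) (dp : List (List Int)) (hi : i1 < dp.length) (hm : m ≤ (dp[i1]).length),
    (PySem.List.pyRange 0 (m : Int) 1).foldl
      (fun d i2 => PySem.List.pySetD d (i1 : Int)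
        (PySem.List.pySetD (PySem.List.pyGetD d (i1 : Int) []) i2 (V d i2))) dp
    = dp.set i1 (((PySem.List.pyRange 0 (m : Int) 1).map (fun j => V dp j)) ++ (dp[i1]).drop m) := by
  intro m
  induction m with
  | zero =>
    intro dp hi hm
    rw [PySem.List.pyRange_one_eq_nil (by norm_num)]
    simp [List.set_getElem_self hi]
  | succ m ih =>
    intro dp hi hm
    rw [show (((m + 1 : Nat)) : Int) = ((m : Nat) : Int) + 1 from by push_cast; ring,
      PySem.List.pyRange_one_succ_right (by positivity), List.foldl_append]
    rw [ih dp hi (by omega)]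
    set L := (PySem.List.pyRange 0 ((m : Nat) : Int) 1).map (fun j => V dp j) with hL
    have hLlen : L.length = m := by simp [hL, PySem.List.length_pyRange_one]
    simp only [List.foldl_cons, List.foldl_nil]
    have hget : PySem.List.pyGetD (dp.set i1 (L ++ List.drop m dp[i1])) (i1 : Int) []
        = L ++ List.drop m dp[i1] := by
      rw [PySem.List.pyGetD_natCast, List.getD_eq_getElem?_getD,
        List.getElem?_set_self (by omega)]
      rfl
    rw [hget, hV]
    rw [PySem.List.pySetD_natCast, PySem.List.pySetD_natCast, List.set_set]
    congr 1
    rw [List.set_append, if_neg (by omega), hLlen, Nat.sub_self]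
    rw [List.drop_eq_getElem_cons (by omega)]
    simp only [List.set_cons_zero]
    rw [List.map_append]
    simp [hL]

def pvZRow (k : Nat) : List Int := (PySem.List.pyRange 0 (k : Int) 1).map (fun _ => 0)

def pvRowAt (r0 : List Int) (rest : List (List Int)) (k : Nat) : Nat → List Int
  | 0 => r0
  | t + 1 => pvRowStep k (pvRowAt r0 rest k t) (rest.getD t [])

def pvTbl (r0 : List Int) (rest : List (List Int)) (k : Nat) (t : Nat) : List (List Int) :=
  (List.range (rest.length + 1)).map
    (fun i => if i ≤ t then pvRowAt r0 rest k i else pvZRow k)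

theorem pvZRow_length (k : Nat) : (pvZRow k).length = k := by
  simp [pvZRow, PySem.List.length_pyRange_one]

theorem pvRowAt_length (r0 : List Int) (rest : List (List Int)) (k : Nat)
    (hk0 : r0.length = k) : ∀ t, (pvRowAt r0 rest k t).length = k
  | 0 => hk0
  | t + 1 => by simp [pvRowAt, pvRowStep, PySem.List.length_pyRange_one]

theorem pvTbl_length (r0 : List Int) (rest : List (List Int)) (k t : Nat) :
    (pvTbl r0 rest k t).length = rest.length + 1 := by simp [pvTbl]

theorem pvTbl_getElem (r0 : List Int) (rest : List (List Int)) (k t i : Nat)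
    (h : i < rest.length + 1) :
    (pvTbl r0 rest k t)[i]'(by rw [pvTbl_length]; omega)
      = if i ≤ t then pvRowAt r0 rest k i else pvZRow k := by
  simp [pvTbl]

theorem pvTbl_getD (r0 : List Int) (rest : List (List Int)) (k t i : Nat)
    (h : i < rest.length + 1) (hit : i ≤ t) :
    (pvTbl r0 rest k t).getD i [] = pvRowAt r0 rest k i := by
  rw [List.getD_eq_getElem?_getD,
    List.getElem?_eq_getElem (by rw [pvTbl_length]; omega)]
  simp [pvTbl_getElem r0 rest k t i h, hit]

theorem outer_step (r0 : List Int) (rest : List (List Int)) (k : Nat) (t : Nat)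
    (ht : t < rest.length) :
    (PySem.List.pyRange 0 (k : Int) 1).foldl (fun d i2 =>
        PySem.List.pySetD d ((t : Int) + 1)
          (PySem.List.pySetD (PySem.List.pyGetD d ((t : Int) + 1) []) i2
            (PySem.List.pyGetD (PySem.List.pyGetD (r0 :: rest) ((t : Int) + 1) []) i2 0 +
              pvMinExcl (PySem.List.pyGetD d ((t : Int) + 1 - 1) []) (k : Int) i2)))
      (pvTbl r0 rest k t)
    = pvTbl r0 rest k (t + 1) := by
  have hc1 : ((t : Int) + 1) = (((t + 1 : Nat)) : Int) := by push_cast; ring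
  simp only [add_sub_cancel_right]
  simp only [hc1]
  have := loop_set_row (t + 1)
    (fun d i2 => PySem.List.pyGetD (PySem.List.pyGetD (r0 :: rest) (((t + 1 : Nat)) : Int) []) i2 0 +
      pvMinExcl (PySem.List.pyGetD d ((t : Nat) : Int) []) (k : Int) i2)
    (by
      intro d r i2
      simp only []
      congr 2
      rw [PySem.List.pyGetD_natCast, PySem.List.pyGetD_natCast,
        List.getD_eq_getElem?_getD, List.getD_eq_getElem?_getD,
        List.getElem?_set_ne (by omega)])
    k (pvTbl r0 rest k t) (by rw [pvTbl_length]; omega)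
    (by rw [pvTbl_getElem r0 rest k t (t+1) (by omega), if_neg (by omega), pvZRow_length])
  beta_reduce at this
  rw [this]
  have hzrow : (pvTbl r0 rest k t)[t + 1]'(by rw [pvTbl_length]; omega) = pvZRow k := by
    rw [pvTbl_getElem r0 rest k t (t+1) (by omega), if_neg (by omega)]
  rw [hzrow]
  rw [List.drop_of_length_le (by rw [pvZRow_length])]
  rw [List.append_nil]
  have h1 : PySem.List.pyGetD (r0 :: rest) (((t + 1 : Nat)) : Int) [] = rest.getD t [] := by
    rw [PySem.List.pyGetD_natCast]
    exact List.getD_cons_succ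
  have h2 : PySem.List.pyGetD (pvTbl r0 rest k t) (((t : Nat)) : Int) [] = pvRowAt r0 rest k t := by
    rw [PySem.List.pyGetD_natCast]
    exact pvTbl_getD r0 rest k t t (by omega) (le_refl t)
  have hrow : ((PySem.List.pyRange 0 (k : Int) 1).map (fun j =>
      PySem.List.pyGetD (PySem.List.pyGetD (r0 :: rest) (((t + 1 : Nat)) : Int) []) j 0 +
        pvMinExcl (PySem.List.pyGetD (pvTbl r0 rest k t) (((t : Nat)) : Int) []) (k : Int) j))
      = pvRowAt r0 rest k (t + 1) := by
    show _ = pvRowStep k (pvRowAt r0 rest k t) (rest.getD t [])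
    rw [h1, h2]
    rfl
  rw [hrow]
  -- set on the table gives the next table
  apply List.ext_getElem
  · simp [pvTbl]
  · intro i h1 h2
    have hi : i < rest.length + 1 := by simpa [pvTbl] using h2
    by_cases hie : i = t + 1
    · subst hie
      rw [List.getElem_set_self (by rw [List.length_set, pvTbl_length]; omega)]
      rw [pvTbl_getElem r0 rest k (t+1) (t+1) hi, if_pos (le_refl _)]
    · rw [List.getElem_set_ne (by omega)]
      rw [pvTbl_getElem r0 rest k t i hi, pvTbl_getElem r0 rest k (t+1) i hi]
      by_cases h : i ≤ t
      · rw [if_pos h, if_pos (by omega)]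
      · rw [if_neg h, if_neg (by omega)]

theorem outer_loop (r0 : List Int) (rest : List (List Int)) (k : Nat) :
    ∀ t, t ≤ rest.length →
    (PySem.List.pyRange 1 ((t : Int) + 1) 1).foldl
      (fun dp i1 => (PySem.List.pyRange 0 (k : Int) 1).foldl (fun d i2 =>
          PySem.List.pySetD d i1 (PySem.List.pySetD (PySem.List.pyGetD d i1 []) i2
            (PySem.List.pyGetD (PySem.List.pyGetD (r0 :: rest) i1 []) i2 0 +
              pvMinExcl (PySem.List.pyGetD d (i1 - 1) []) (k : Int) i2))) dp)
      (pvTbl r0 rest k 0)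
    = pvTbl r0 rest k t := by
  intro t
  induction t with
  | zero =>
    intro _
    rw [PySem.List.pyRange_one_eq_nil (a := 1) (b := ((0 : Nat) : Int) + 1) (by norm_num)]
    rfl
  | succ t ih =>
    intro ht
    rw [show (((t + 1 : Nat) : Int) + 1) = ((t : Int) + 1) + 1 from by push_cast; ring,
      PySem.List.pyRange_one_succ_right (by omega), List.foldl_append]
    rw [ih (by omega)]
    simp only [List.foldl_cons, List.foldl_nil]
    exact outer_step r0 rest k t (by omega)

theorem init_tbl (r0 : List Int) (rest : List (List Int)) (k : Nat)
    (hk0 : r0.length = k) :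
    (PySem.List.pyRange 0 (k : Int) 1).foldl (fun dp i2 =>
        PySem.List.pySetD dp 0 (PySem.List.pySetD (PySem.List.pyGetD dp 0 []) i2
          (PySem.List.pyGetD r0 i2 0)))
      ((PySem.List.pyRange 0 (((rest.length + 1 : Nat)) : Int) 1).map (fun _ => pvZRow k))
    = pvTbl r0 rest k 0 := by
  have hlen : ((PySem.List.pyRange 0 (((rest.length + 1 : Nat)) : Int) 1).map
      (fun _ => pvZRow k)).length = rest.length + 1 := by
    simp [PySem.List.length_pyRange_one]
  have hget0 : ((PySem.List.pyRange 0 (((rest.length + 1 : Nat)) : Int) 1).map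
      (fun _ => pvZRow k))[0]'(by omega) = pvZRow k := by
    simp
  have := loop_set_row 0 (fun _ i2 => PySem.List.pyGetD r0 i2 0)
    (by intro d r i2; rfl) k
    ((PySem.List.pyRange 0 (((rest.length + 1 : Nat)) : Int) 1).map (fun _ => pvZRow k))
    (by omega) (by rw [hget0, pvZRow_length])
  simp only [Nat.cast_zero] at this
  rw [this]
  rw [hget0, List.drop_of_length_le (by rw [pvZRow_length]), List.append_nil]
  have hr0 : (PySem.List.pyRange 0 (k : Int) 1).map (fun j => PySem.List.pyGetD r0 j 0)
      = r0 := by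
    rw [← hk0]
    exact PySem.List.map_pyGetD_pyRange_zero r0 0
  rw [hr0]
  apply List.ext_getElem
  · simp [pvTbl, PySem.List.length_pyRange_one]
  · intro i h1 h2
    have hi : i < rest.length + 1 := by
      rw [List.length_set, hlen] at h1; omega
    rw [pvTbl_getElem r0 rest k 0 i hi]
    by_cases hi0 : i = 0
    · subst hi0
      rw [List.getElem_set_self (by omega)]
      rfl
    · rw [List.getElem_set_ne (by omega)]
      rw [if_neg (by omega)]
      simp

theorem b_fold (r0 : List Int) (rest : List (List Int)) (k : Nat)
    (hk0 : r0.length = k) (hrows : ∀ r ∈ rest, k ≤ r.length) (hk2 : rest = [] ∨ 2 ≤ k) :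
    ∀ t, t ≤ rest.length →
    (rest.take t).foldl (fun prev row =>
      (PySem.List.enumerate (PySem.List.slice row none (some (k : Int))) 0).map
        (fun q => q.2 + (if q.1 = ((PySem.List.enumerate prev 0).foldl pvScanStep (none, none, -1)).2.2
          then ((PySem.List.enumerate prev 0).foldl pvScanStep (none, none, -1)).2.1.getD 0
          else ((PySem.List.enumerate prev 0).foldl pvScanStep (none, none, -1)).1.getD 0))) r0
    = pvRowAt r0 rest k t := by
  intro t
  induction t with
  | zero => intro _; rfl
  | succ t ih =>
    intro ht
    have htl : t < rest.length := by omega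
    rw [List.take_add_one, List.getElem?_eq_getElem htl]
    simp only [Option.toList_some]
    rw [List.foldl_append]
    rw [ih (by omega)]
    simp only [List.foldl_cons, List.foldl_nil]
    have hrest : rest ≠ [] := by intro hcon; rw [hcon] at htl; simp at htl
    have hk2' : 2 ≤ k := hk2.resolve_left hrest
    have := bRow_eq (pvRowAt r0 rest k t) (rest[t]'htl) k
      (pvRowAt_length r0 rest k hk0 t) (hrows _ (List.getElem_mem htl)) hk2'
    rw [this]
    show _ = pvRowStep k (pvRowAt r0 rest k t) (rest.getD t [])
    rw [List.getD_eq_getElem?_getD, List.getElem?_eq_getElem htl]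
    rfl




theorem minCostII_spec' : ∀ (costs : List (List Int)), Pre_minCostII costs →
    minCostII costs = minCostII_alt costs := by
  intro costs hpre
  match costs with
  | [] => rfl
  | r0 :: rest =>
    by_cases hr0 : r0 = []
    · subst hr0
      simp [minCostII, minCostII_alt, PySem.List.pyGetD_zero_cons]
    · obtain ⟨hrows, hor⟩ : (∀ r ∈ r0 :: rest, r0.length ≤ r.length) ∧
          ((r0 :: rest).length = 1 ∨ 2 ≤ r0.length) := by
        rcases hpre with h | h | h
        · exact absurd h (by simp)
        · exact absurd h (by simp [hr0])
        · simpa using h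
      have hk2 : rest = [] ∨ 2 ≤ r0.length := by
        rcases hor with h | h
        · left; simpa using h
        · right; exact h
      have hrows' : ∀ r ∈ rest, r0.length ≤ r.length := by
        intro r hr; exact hrows r (List.mem_cons_of_mem _ hr)
      rw [minCostII, minCostII_alt]
      rw [if_neg (by simp [hr0])]
      rw [if_neg hr0]
      simp only [PySem.List.pyGetD_zero_cons, List.length_cons]
      set k := r0.length with hk
      rw [show (fun _ : Int => List.map (fun _ => (0 : Int)) (PySem.List.pyRange 0 (k : Int) 1))
          = (fun _ : Int => pvZRow k) from rfl]
      rw [init_tbl r0 rest k rfl]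
      rw [show (((rest.length + 1 : Nat)) : Int) = ((rest.length : Nat) : Int) + 1 from by
        push_cast; ring]
      rw [outer_loop r0 rest k rest.length (le_refl _)]
      have hne : pvTbl r0 rest k rest.length ≠ [] := by
        intro h
        have h2 := pvTbl_length r0 rest k rest.length
        rw [h] at h2
        simp at h2
      rw [PySem.List.pyGetD_neg_one _ _ hne, List.getLast_eq_getElem]
      have hlast : (pvTbl r0 rest k rest.length)[(pvTbl r0 rest k rest.length).length - 1]'(by
          rw [pvTbl_length]; omega) = pvRowAt r0 rest k rest.length := by
        have hidx : (pvTbl r0 rest k rest.length).length - 1 = rest.length := by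
          rw [pvTbl_length]; omega
        simp only [hidx]
        rw [pvTbl_getElem r0 rest k rest.length rest.length (by omega), if_pos (le_refl _)]
      rw [hlast]
      conv_rhs => rw [show rest = rest.take rest.length from (List.take_length).symm]
      rw [b_fold r0 rest k rfl hrows' hk2 rest.length (le_refl _)]

-- ===== VERDICT (by name: the statement is the Claim_ definition above) =====
theorem minCostII_spec : Claim_equal_minCostII := by
  intro costs _ hpre
  exact minCostII_spec' costs hpre
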